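-- pv_equiv track=rewrite | github.com/akash1551/pytoon | pytoon/toon.py | _all_dicts_uniform
-- ===== SOURCE A (Python) =====
-- from typing import Any, List, Tuple, Dict
--
-- def _all_dicts_uniform(list_of_dicts: List[dict]) -> Tuple[bool, List[str] or None]:
--     """
--     Return (is_uniform, keys_order).
--     Uniform means every element is a dict and they all have the same set of keys.
--     If insertion order is consistent across elements, return that order; otherwise return sorted keys.
--     """
--     if not list_of_dicts:
--         return False, None
--     if not all(isinstance(item, dict) for item in list_of_dicts):
--         return False, None
--     sets = [set(d.keys()) for d in list_of_dicts]
--     first_set = sets[0]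
--     if all(s == first_set for s in sets):
--         first_keys = list(list_of_dicts[0].keys())
--         if all(tuple(d.keys()) == tuple(first_keys) for d in list_of_dicts):
--             return True, first_keys
--         return True, sorted(first_set)
--     return False, None
-- ===== SOURCE B (Python) =====
-- def _all_dicts_uniform(list_of_dicts):
--     if not list_of_dicts:
--         return False, None
--     if not all(isinstance(item, dict) for item in list_of_dicts):
--         return False, None
--     # distinct key orders, first occurrence first (ordered dedup)
--     orders = list(dict.fromkeys(tuple(d.keys()) for d in list_of_dicts))
--     first, rest = orders[0], orders[1:]
--     if not rest:
--         return True, list(first)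
--     canon = sorted(first)
--     if all(sorted(kt) == canon for kt in rest):
--         return True, canon
--     return False, None
-- ===== Notes on version B (the rewrite author's own statement) =====
-- stated objective: alternative
-- what changed: B first dedups the key tuples (ordered dedup of distinct key orders) and then decides key-set equality by comparing sorted key lists against one canonical sorted form, instead of A's per-dict table of key sets plus two separate all() rescans over the whole input.
import Mathlib
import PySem

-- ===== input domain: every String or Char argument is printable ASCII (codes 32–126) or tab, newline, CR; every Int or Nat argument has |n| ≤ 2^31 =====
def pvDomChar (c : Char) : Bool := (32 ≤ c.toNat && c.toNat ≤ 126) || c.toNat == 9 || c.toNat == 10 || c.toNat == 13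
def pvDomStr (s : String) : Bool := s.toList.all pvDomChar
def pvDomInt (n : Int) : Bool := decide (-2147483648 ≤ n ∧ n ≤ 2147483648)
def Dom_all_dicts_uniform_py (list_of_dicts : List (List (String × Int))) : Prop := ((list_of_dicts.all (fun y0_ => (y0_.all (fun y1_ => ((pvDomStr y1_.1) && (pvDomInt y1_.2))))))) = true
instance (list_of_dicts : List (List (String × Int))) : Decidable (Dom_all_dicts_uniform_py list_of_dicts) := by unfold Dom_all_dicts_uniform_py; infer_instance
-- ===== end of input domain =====

-- B dedups the key TUPLES first (ordered dedup via dict.fromkeys, so only the distinct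
-- key orders survive) and decides key-set equality by comparing each surviving order's
-- SORTED key list against one canonical sorted form, instead of A's per-dict table of
-- key sets plus two full all() rescans of the input (objective: alternative).
-- Under the type convention a dict is an assoc list; d.keys() is ported as
-- PySem.List.dedup (d.map Prod.fst) (first occurrence of each key = Python dict order),
-- and A's isinstance(item, dict) guard is vacuously true, ported as `all` of the
-- constant-true predicate.

-- ===== PORT A =====
def all_dicts_uniform_py (list_of_dicts : List (List (String × Int))) : Bool × Option (List String) :=
  if list_of_dicts = [] then (false, none)
  else if ¬ (list_of_dicts.all (fun _ => true)) then (false, none)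
  else
    let sets := list_of_dicts.map (fun d => PySem.Set.ofList (d.map Prod.fst))
    let first_set := sets.headI
    if sets.all (fun s => PySem.Set.equal s first_set) then
      let first_keys := PySem.List.dedup ((list_of_dicts.headI).map Prod.fst)
      if list_of_dicts.all (fun d => PySem.List.dedup (d.map Prod.fst) == first_keys) then
        (true, some first_keys)
      else
        (true, some (PySem.List.sorted first_set (fun x => x) false))
    else (false, none)


-- ===== PORT B =====
def all_dicts_uniform_py_alt (list_of_dicts : List (List (String × Int))) : Bool × Option (List String) :=
  if list_of_dicts = [] then (false, none)
  else if ¬ (list_of_dicts.all (fun _ => true)) then (false, none)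
  else
    let orders := PySem.List.dedup (list_of_dicts.map (fun d => PySem.List.dedup (d.map Prod.fst)))
    match orders with
    | [] => (false, none)
    | first :: rest =>
      if rest = [] then (true, some first)
      else
        let canon := PySem.List.sorted first (fun x => x) false
        if rest.all (fun kt => PySem.List.sorted kt (fun x => x) false == canon) then
          (true, some canon)
        else (false, none)


-- ===== PRECONDITION & SPEC =====
def Spec_all_dicts_uniform_py (list_of_dicts : List (List (String × Int))) (out : Bool × Option (List String)) : Prop := out = all_dicts_uniform_py_alt list_of_dicts
instance (list_of_dicts : List (List (String × Int))) (out : Bool × Option (List String)) : Decidable (Spec_all_dicts_uniform_py list_of_dicts out) := by unfold Spec_all_dicts_uniform_py; infer_instance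

-- ===== CLAIM (what is proved, stated in full; the proofs are below) =====
def Claim_equal_all_dicts_uniform_py : Prop := ∀ (list_of_dicts : List (List (String × Int))), Dom_all_dicts_uniform_py list_of_dicts → Spec_all_dicts_uniform_py list_of_dicts (all_dicts_uniform_py list_of_dicts)

-- ===== LEMMAS AND PROOFS =====

theorem foldl_add_extends {α : Type} [BEq α] [LawfulBEq α] (xs : List α) (s : PySem.Set α) :
    ∃ u, xs.foldl PySem.Set.add s = s ++ u := by
  induction xs generalizing s with
  | nil => exact ⟨[], by simp⟩
  | cons x xs ih =>
    obtain ⟨u, hu⟩ := ih (PySem.Set.add s x)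
    simp only [List.foldl_cons, hu]
    by_cases hc : x ∈ s
    · exact ⟨u, by simp [PySem.Set.add, hc]⟩
    · exact ⟨x :: u, by simp [PySem.Set.add, hc]⟩

theorem dedup_cons {α : Type} [BEq α] [LawfulBEq α] (x : α) (xs : List α) :
    ∃ u, PySem.List.dedup (x :: xs) = x :: u := by
  obtain ⟨u, hu⟩ := foldl_add_extends xs [x]
  refine ⟨u, ?_⟩
  simp only [PySem.List.dedup_eq_ofList]
  show (x :: xs).foldl PySem.Set.add [] = x :: u
  simpa [PySem.Set.add] using hu

theorem equal_iff_sorted_eq (s t : List String) (hs : s.Nodup) (ht : t.Nodup) :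
    PySem.Set.equal s t = true ↔
      PySem.List.sorted s (fun x => x) false = PySem.List.sorted t (fun x => x) false := by
  rw [PySem.Set.equal_iff, PySem.List.sorted_id_eq_sorted_id_iff_perm,
    List.perm_ext_iff_of_nodup hs ht]
theorem ports_agree_cons (d0 : List (String × Int)) (t : List (List (String × Int))) :
    all_dicts_uniform_py (d0 :: t) = all_dicts_uniform_py_alt (d0 :: t) := by
  obtain ⟨rest, hrest⟩ := dedup_cons (PySem.List.dedup (d0.map Prod.fst))
    (t.map (fun d => PySem.List.dedup (d.map Prod.fst)))
  set k0 := PySem.List.dedup (d0.map Prod.fst) with hk0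
  have hmemK : ∀ y, y ∈ k0 :: rest ↔
      y ∈ k0 :: t.map (fun d => PySem.List.dedup (d.map Prod.fst)) := by
    intro y
    rw [← hrest]
    exact PySem.List.mem_dedup _ y
  have hndK : (k0 :: rest).Nodup := hrest ▸ PySem.List.nodup_dedup _
  simp only [all_dicts_uniform_py, all_dicts_uniform_py_alt, List.map_cons, List.headI_cons,
    reduceCtorEq, if_false, List.all_eq_true, implies_true, not_true_eq_false]
  rw [hrest]
  simp only [← PySem.List.dedup_eq_ofList]
  rw [← hk0]
  have hK : ∀ x ∈ d0 :: t, PySem.List.dedup (x.map Prod.fst) ∈ k0 :: rest := by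
    intro x hx
    rcases List.mem_cons.1 hx with rfl | hxt
    · exact (hmemK _).2 List.mem_cons_self
    · exact (hmemK _).2 (List.mem_cons_of_mem _ (List.mem_map_of_mem hxt))
  have hndk : ∀ y ∈ k0 :: rest, List.Nodup y := by
    intro y hy
    rcases List.mem_cons.1 ((hmemK y).1 hy) with rfl | hyt
    · exact PySem.List.nodup_dedup _
    · obtain ⟨d, _, rfl⟩ := List.mem_map.1 hyt
      exact PySem.List.nodup_dedup _
  by_cases hord : rest = []
  · subst hord
    have hall : ∀ x ∈ d0 :: t, PySem.List.dedup (x.map Prod.fst) = k0 := by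
      intro x hx; simpa using hK x hx
    have hset : ∀ x ∈ k0 :: t.map (fun d => PySem.List.dedup (d.map Prod.fst)),
        PySem.Set.equal x k0 = true := by
      intro x hx
      have hx1 : x = k0 := List.mem_singleton.1 ((hmemK x).2 hx)
      subst hx1
      exact (PySem.Set.equal_iff _ _).2 (fun _ => Iff.rfl)
    rw [if_pos hset, if_pos (fun x hx => beq_iff_eq.2 (hall x hx))]
    simp
  · obtain ⟨r, rs, rfl⟩ := List.exists_cons_of_ne_nil hord
    have hr_ne : r ≠ k0 := by
      intro h
      have := hndK
      simp [h] at this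
    obtain ⟨dr, hdr, hdreq⟩ := List.mem_map.1
      (List.mem_cons.1 ((hmemK r).1 (by simp)) |>.resolve_left hr_ne)
    have hord_false : ¬ ∀ x ∈ d0 :: t,
        (PySem.List.dedup (x.map Prod.fst) == k0) = true := by
      intro h
      exact hr_ne (hdreq ▸ beq_iff_eq.1 (h dr (List.mem_cons_of_mem _ hdr)))
    have hiff : (∀ x ∈ k0 :: t.map (fun d => PySem.List.dedup (d.map Prod.fst)),
        PySem.Set.equal x k0 = true) ↔
        (∀ kt ∈ r :: rs,
          (PySem.List.sorted kt fun x => x) = PySem.List.sorted k0 fun x => x) := by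
      constructor
      · intro h kt hkt
        have hktK := (hmemK kt).1 (List.mem_cons_of_mem _ hkt)
        exact (equal_iff_sorted_eq _ _ (hndk kt (List.mem_cons_of_mem _ hkt))
          (hndk k0 List.mem_cons_self)).1 (h kt hktK)
      · intro h x hx
        rcases List.mem_cons.1 ((hmemK x).2 hx) with rfl | hxr
        · exact (PySem.Set.equal_iff _ _).2 (fun _ => Iff.rfl)
        · exact (equal_iff_sorted_eq _ _ (hndk x (List.mem_cons_of_mem _ hxr))
            (hndk k0 List.mem_cons_self)).2 (h x hxr)
    rw [if_neg hord_false, if_neg (by simp : ¬(r :: rs = []))]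
    by_cases hset : ∀ x ∈ k0 :: t.map (fun d => PySem.List.dedup (d.map Prod.fst)),
        PySem.Set.equal x k0 = true
    · rw [if_pos hset, if_pos (fun kt hkt => beq_iff_eq.2 (hiff.1 hset kt hkt))]
    · rw [if_neg hset, if_neg (fun h => hset (hiff.2 (fun kt hkt => beq_iff_eq.1 (h kt hkt))))]

-- ===== VERDICT (by name: the statement is the Claim_ definition above) =====
theorem all_dicts_uniform_py_spec : Claim_equal_all_dicts_uniform_py := by
  intro l _
  show all_dicts_uniform_py l = all_dicts_uniform_py_alt l
  cases l with
  | nil => rfl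
  | cons d0 t => exact ports_agree_cons d0 t
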